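-- pv_equiv track=rewrite | github.com/raeez/chiral-bar-cobar | compute/lib/cy_factorization_homology_k3e_engine.py | hkr_alt
-- ===== SOURCE A (Python) =====
-- from typing import Any, Dict, List, Optional, Tuple
--
-- def hkr_alt(hodge: Dict[Tuple[int, int], int]) -> Dict[int, int]:
--     """Alternative HKR grading: HH^n = bigoplus_{q-p=n} H^p(Omega^q_X).
--
--     This is the homological/categorical convention.
--     """
--     hh: Dict[int, int] = {}
--     for (p, q), v in hodge.items():
--         if v == 0:
--             continue
--         n = q - p
--         hh[n] = hh.get(n, 0) + v
--     return hh
-- ===== SOURCE B (Python) =====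
-- def hkr_alt(hodge):
--     items = [(q - p, v) for (p, q), v in hodge.items() if v != 0]
--     keys = list(dict.fromkeys(n for n, _ in items))
--     return {n: sum(v for m, v in items if m == n) for n in keys}
-- ===== Notes on version B (the rewrite author's own statement) =====
-- stated objective: alternative
-- what changed: Replaces the single dict-accumulation pass with a two-phase group-by: filter nonzero entries into (q-p, v) items, dedup the keys in first-occurrence order, then compute each group's sum by a per-key scan.
import Mathlib
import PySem

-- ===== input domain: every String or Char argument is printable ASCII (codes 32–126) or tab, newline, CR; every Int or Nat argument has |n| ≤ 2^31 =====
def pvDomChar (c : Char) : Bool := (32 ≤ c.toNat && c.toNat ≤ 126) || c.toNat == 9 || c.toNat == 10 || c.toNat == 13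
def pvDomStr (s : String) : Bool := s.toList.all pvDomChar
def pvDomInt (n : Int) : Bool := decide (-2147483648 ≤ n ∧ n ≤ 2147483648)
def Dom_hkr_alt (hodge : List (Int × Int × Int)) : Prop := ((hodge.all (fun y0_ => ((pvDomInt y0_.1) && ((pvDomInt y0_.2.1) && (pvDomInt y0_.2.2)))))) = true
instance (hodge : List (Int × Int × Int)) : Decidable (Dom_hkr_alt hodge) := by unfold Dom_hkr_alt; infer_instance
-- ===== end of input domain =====

-- B replaces A's single dict-accumulation pass by a two-phase group-by (filter nonzero items, dedup keys, per-key sum scan): an alternative decomposition, same return value.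


-- ===== PORT A =====
def hkr_alt (hodge : List (Int × Int × Int)) : List (Int × Int) :=
  (hodge.foldl
    (fun hh t =>
      if t.2.2 = 0 then hh
      else hh.insert (t.2.1 - t.1) (hh.getD (t.2.1 - t.1) 0 + t.2.2))
    (PySem.Dict.empty : PySem.Dict Int Int)).items

-- ===== PORT B =====
def hkr_alt_alt (hodge : List (Int × Int × Int)) : List (Int × Int) :=
  let items := hodge.filterMap (fun t => if t.2.2 = 0 then none else some (t.2.1 - t.1, t.2.2))
  let keys := PySem.List.dedup (items.map Prod.fst)
  keys.map (fun n => (n, ((items.filter (fun x => x.1 == n)).map (·.2)).sum))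

-- ===== PRECONDITION & SPEC =====
def Spec_hkr_alt (hodge : List (Int × Int × Int)) (out : List (Int × Int)) : Prop := out = hkr_alt_alt hodge
instance (hodge : List (Int × Int × Int)) (out : List (Int × Int)) : Decidable (Spec_hkr_alt hodge out) := by unfold Spec_hkr_alt; infer_instance

-- ===== CLAIM (what is proved, stated in full; the proofs are below) =====
def Claim_equal_hkr_alt : Prop := ∀ (hodge : List (Int × Int × Int)), Dom_hkr_alt hodge → Spec_hkr_alt hodge (hkr_alt hodge)

-- ===== LEMMAS AND PROOFS =====

-- A's zero-skipping fold over the raw triples equals the plain sum-accumulation fold over B's filtered (q-p, v) items.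
theorem hkr_fold_filterMap (hodge : List (Int × Int × Int)) (d : PySem.Dict Int Int) :
    hodge.foldl
      (fun hh t =>
        if t.2.2 = 0 then hh
        else hh.insert (t.2.1 - t.1) (hh.getD (t.2.1 - t.1) 0 + t.2.2)) d
    = (hodge.filterMap (fun t => if t.2.2 = 0 then none else some (t.2.1 - t.1, t.2.2))).foldl
        (fun hh x => hh.insert x.1 (hh.getD x.1 0 + x.2)) d := by
  induction hodge generalizing d with
  | nil => rfl
  | cons t rest ih =>
    by_cases h : t.2.2 = 0 <;> simp [h, ih]

-- Lookup in the sum-accumulation fold: initial value plus the sum of matching values.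
theorem getD_fold_sum (l : List (Int × Int)) (d : PySem.Dict Int Int) (n : Int) :
    (l.foldl (fun hh x => hh.insert x.1 (hh.getD x.1 0 + x.2)) d).getD n 0
    = d.getD n 0 + ((l.filter (fun x => x.1 == n)).map (·.2)).sum := by
  induction l generalizing d with
  | nil => simp
  | cons x rest ih =>
    by_cases h : x.1 = n
    · subst h
      simp [ih]
      ring
    · simp [h, ih, PySem.Dict.getD_insert, Ne.symm h]

theorem hkr_alt_eq : ∀ (hodge : List (Int × Int × Int)), hkr_alt hodge = hkr_alt_alt hodge := by
  intro hodge
  unfold hkr_alt hkr_alt_alt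
  rw [hkr_fold_filterMap]
  set l := hodge.filterMap (fun t => if t.2.2 = 0 then none else some (t.2.1 - t.1, t.2.2)) with hl
  have hnd : (l.foldl (fun hh x => hh.insert x.1 (hh.getD x.1 0 + x.2))
      (PySem.Dict.empty : PySem.Dict Int Int)).keys.Nodup := by
    exact PySem.Dict.nodup_keys_foldl_insert_key l Prod.fst _ _ PySem.Dict.nodup_keys_empty
  rw [PySem.Dict.items_eq_map_keys _ hnd 0]
  have hkeys : (l.foldl (fun hh x => hh.insert x.1 (hh.getD x.1 0 + x.2))
      (PySem.Dict.empty : PySem.Dict Int Int)).keys = PySem.List.dedup (l.map Prod.fst) := by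
    rw [PySem.Dict.keys_foldl_insert_key l Prod.fst]
    simp [PySem.Set.update_nil_left]
  rw [hkeys]
  refine List.map_congr_left ?_
  intro n _
  rw [getD_fold_sum]
  simp

-- ===== VERDICT (by name: the statement is the Claim_ definition above) =====
theorem hkr_alt_spec : Claim_equal_hkr_alt := by
  intro hodge _
  exact hkr_alt_eq hodge
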